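-- pv_equiv track=rewrite | github.com/Arujjangletmelickonce/maka-web | app.py | group_runs_by_week
-- ===== SOURCE A (Python) =====
-- def group_runs_by_week(items: list[dict]):
--     grouped = {}
--
--     for item in items:
--         key = item["week_label"]
--         if key not in grouped:
--             grouped[key] = []
--         grouped[key].append(item)
--
--     # 주차 그룹도 최신순
--     week_keys = sorted(grouped.keys(), reverse=True)
--
--     return grouped, week_keys
-- ===== SOURCE B (Python) =====
-- def group_runs_by_week(items: list[dict]):
--     # distinct week labels in first-occurrence order, then one filter per key
--     keys = list(dict.fromkeys(item["week_label"] for item in items))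
--     grouped = {k: [it for it in items if it["week_label"] == k] for k in keys}
--     return grouped, sorted(keys, reverse=True)
-- ===== Notes on version B (the rewrite author's own statement) =====
-- stated objective: alternative
-- what changed: Replaces the incremental dict-append grouping loop by a distinct-keys pass (dict.fromkeys) followed by a per-key filter comprehension; sorted keys come from that key list instead of the built dict.
import Mathlib
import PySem

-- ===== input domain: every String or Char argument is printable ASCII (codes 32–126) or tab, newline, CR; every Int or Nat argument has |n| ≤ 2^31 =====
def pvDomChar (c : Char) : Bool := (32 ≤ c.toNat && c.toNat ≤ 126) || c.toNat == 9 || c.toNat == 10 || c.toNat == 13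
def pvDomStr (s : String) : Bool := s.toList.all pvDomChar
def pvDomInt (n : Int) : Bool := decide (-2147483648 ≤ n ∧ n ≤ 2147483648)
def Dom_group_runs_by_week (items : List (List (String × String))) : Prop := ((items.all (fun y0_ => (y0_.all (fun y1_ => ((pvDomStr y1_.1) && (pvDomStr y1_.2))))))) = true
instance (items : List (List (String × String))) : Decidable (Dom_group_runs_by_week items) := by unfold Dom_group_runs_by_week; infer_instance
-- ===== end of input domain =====

-- B groups by a distinct-keys pass plus one filter per key instead of A's incremental
-- dict-append loop (objective: alternative, similar cost on few distinct keys).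

-- item["week_label"]; Python raises KeyError when the lookup is none — Pre_ excludes
-- exactly those inputs, so the default "" is never reached inside Pre_.
def pvKey (item : List (String × String)) : String :=
  ((PySem.Dict.mk item).get? "week_label").getD ""

-- ===== PORT A =====
def group_runs_by_week (items : List (List (String × String))) : (List (String × List (List (String × String)))) × List String :=
  let grouped : PySem.Dict String (List (List (String × String))) :=
    items.foldl (fun g item =>
      let key := pvKey item
      let g := if g.contains key then g else g.insert key []
      g.modify key [] (fun l => l ++ [item])) PySem.Dict.empty
  let week_keys := PySem.List.sorted grouped.keys (fun k => k) true
  (grouped.items, week_keys)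

-- ===== PORT B =====
def group_runs_by_week_alt (items : List (List (String × String))) : (List (String × List (List (String × String)))) × List String :=
  let keys := PySem.List.dedup (items.map pvKey)
  let grouped := keys.map (fun k => (k, items.filter (fun it => pvKey it == k)))
  (grouped, PySem.List.sorted keys (fun k => k) true)

-- ===== PRECONDITION & SPEC =====
-- Pre_ excludes exactly the inputs where item["week_label"] raises KeyError (an item
-- without the "week_label" key).
def Pre_group_runs_by_week (items : List (List (String × String))) : Prop :=
  (items.all (fun item => (PySem.Dict.mk item).contains "week_label")) = true
instance (items : List (List (String × String))) : Decidable (Pre_group_runs_by_week items) := by unfold Pre_group_runs_by_week; infer_instance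

def pvWitness_group_runs_by_week : (List (List (String × String))) :=
  [[("week_label", "2024-W01"), ("title", "a")], [("week_label", "2023-W52")]]

def Spec_group_runs_by_week (items : List (List (String × String))) (out : (List (String × List (List (String × String)))) × List String) : Prop := out = group_runs_by_week_alt items
instance (items : List (List (String × String))) (out : (List (String × List (List (String × String)))) × List String) : Decidable (Spec_group_runs_by_week items out) := by unfold Spec_group_runs_by_week; infer_instance

-- ===== CLAIM (what is proved, stated in full; the proofs are below) =====
def Claim_equal_group_runs_by_week : Prop := ∀ (items : List (List (String × String))), Dom_group_runs_by_week items → Pre_group_runs_by_week items → Spec_group_runs_by_week items (group_runs_by_week items)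

-- ===== LEMMAS AND PROOFS =====

-- A's loop body equals a single modify-append (the explicit "insert [] if absent" is
-- absorbed by modify's default).
theorem stepA_eq_modify (g : PySem.Dict String (List (List (String × String)))) (item : List (String × String)) :
    (let key := pvKey item
     let g := if g.contains key then g else g.insert key []
     g.modify key [] (fun l => l ++ [item]))
    = g.modify (pvKey item) [] (fun l => l ++ [item]) := by
  by_cases h : g.contains (pvKey item) = true
  · simp [h]
  · simp only [Bool.not_eq_true] at h
    have hnone : g.get? (pvKey item) = none := by
      cases hg : g.get? (pvKey item) with
      | none => rfl
      | some v =>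
        have hc := PySem.Dict.contains_eq_isSome_get? (d := g) (k := pvKey item)
        rw [hg] at hc
        simp [hc] at h
    simp [PySem.Dict.modify, PySem.Dict.getD_eq_get?_getD, hnone, h,
      PySem.Dict.get?_insert_self, PySem.Dict.insert_insert_self]

theorem foldlA_eq_foldl_modify (items : List (List (String × String)))
    (g : PySem.Dict String (List (List (String × String)))) :
    items.foldl (fun g item =>
      let key := pvKey item
      let g := if g.contains key then g else g.insert key []
      g.modify key [] (fun l => l ++ [item])) g
    = items.foldl (fun g item => g.modify (pvKey item) [] (fun l => l ++ [item])) g := by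
  induction items generalizing g with
  | nil => rfl
  | cons a t ih => simpa [stepA_eq_modify] using ih _

theorem group_runs_by_week_spec : Claim_equal_group_runs_by_week := by
  intro items _ _
  unfold Spec_group_runs_by_week group_runs_by_week group_runs_by_week_alt
  simp only [foldlA_eq_foldl_modify]
  have hfold : items.foldl (fun g item => g.modify (pvKey item) [] (fun l => l ++ [item])) PySem.Dict.empty
      = (items.map (fun it => (pvKey it, it))).foldl (fun g p => g.modify p.1 [] (fun l => l ++ [p.2])) PySem.Dict.empty :=
    by rw [List.foldl_map]
  have hnd : (items.foldl (fun g item => g.modify (pvKey item) [] (fun l => l ++ [item])) PySem.Dict.empty).keys.Nodup :=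
    PySem.Dict.nodup_keys_foldl_modify_key items pvKey [] _ _ PySem.Dict.nodup_keys_empty
  have hkeys : (items.foldl (fun g item => g.modify (pvKey item) [] (fun l => l ++ [item])) PySem.Dict.empty).keys
      = PySem.List.dedup (items.map pvKey) := by
    rw [PySem.List.dedup_eq_ofList]
    simpa using PySem.Dict.keys_foldl_modify_key items pvKey [] _ PySem.Dict.empty
  have hgetD : ∀ k, (items.foldl (fun g item => g.modify (pvKey item) [] (fun l => l ++ [item])) PySem.Dict.empty).getD k []
      = items.filter (fun it => pvKey it == k) := by
    intro k
    rw [hfold, PySem.Dict.getD_foldl_modify_append, PySem.Dict.getD_empty]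
    rw [List.filter_map, List.map_map]
    simp [Function.comp_def]
  have hitems : (items.foldl (fun g item => g.modify (pvKey item) [] (fun l => l ++ [item])) PySem.Dict.empty).items
      = (PySem.List.dedup (items.map pvKey)).map
        (fun k => (k, items.filter (fun it => pvKey it == k))) := by
    rw [PySem.Dict.items_eq_map_keys _ hnd [], hkeys]
    exact List.map_congr_left (fun k _ => by rw [hgetD])
  simp only [hitems, hkeys]
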